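-- pv_equiv track=rewrite | github.com/mukeshsoni/zmk-config-totem | scripts/generate_totem_layout_reference.py | parse_binding_groups
-- ===== SOURCE A (Python) =====
-- BEHAVIOR_ARG_COUNTS = {
--     "&kp": 1,
--     "&hml": 2,
--     "&hmr": 2,
--     "&hmr_meh": 2,
--     "&lt": 2,
--     "&sk": 1,
--     "&bt": 2,
-- }
--
-- def parse_binding_groups(tokens: list[str], expected: int = 38) -> list[list[str]]:
--     groups: list[list[str]] = []
--     i = 0
--     while i < len(tokens):
--         token = tokens[i]
--         if token.startswith("&"):
--             if token == "&bt":
--                 if i + 1 >= len(tokens):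
--                     raise ValueError("Incomplete &bt binding")
--                 argc = 2 if tokens[i + 1] == "BT_SEL" else 1
--             else:
--                 argc = BEHAVIOR_ARG_COUNTS.get(token, 0)
--             group = tokens[i : i + 1 + argc]
--             i += 1 + argc
--         else:
--             group = [token]
--             i += 1
--         groups.append(group)
--
--     if len(groups) != expected:
--         raise ValueError(f"Expected {expected} bindings, got {len(groups)}")
--
--     return groups
-- ===== SOURCE B (Python) =====
-- BEHAVIOR_ARG_COUNTS = {
--     "&kp": 1,
--     "&hml": 2,
--     "&hmr": 2,
--     "&hmr_meh": 2,
--     "&lt": 2,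
--     "&sk": 1,
--     "&bt": 2,
-- }
--
-- def parse_binding_groups(tokens: list[str], expected: int = 38) -> list[list[str]]:
--     # Single forward pass: keep the currently open group plus a countdown of
--     # arguments it is still owed; '&bt' defers its countdown until the next
--     # token is seen (2 args iff it is 'BT_SEL').
--     groups: list[list[str]] = []
--     current = None
--     need = 0
--     pending_bt = False
--     for token in tokens:
--         if current is None:
--             current = [token]
--             if token == "&bt":
--                 pending_bt = True
--             else:
--                 need = BEHAVIOR_ARG_COUNTS.get(token, 0)
--         else:
--             current.append(token)
--             if pending_bt:
--                 pending_bt = False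
--                 need = 1 if token == "BT_SEL" else 0
--             else:
--                 need -= 1
--         if not pending_bt and need == 0:
--             groups.append(current)
--             current = None
--     if current is not None:
--         if pending_bt:
--             raise ValueError("Incomplete &bt binding")
--         groups.append(current)
--     if len(groups) != expected:
--         raise ValueError(f"Expected {expected} bindings, got {len(groups)}")
--     return groups
-- ===== Notes on version B (the rewrite author's own statement) =====
-- stated objective: alternative
-- what changed: A's index-based while loop that slices tokens[i:i+1+argc] is replaced by a single forward fold over the tokens maintaining the currently open group, a countdown of arguments still owed, and a pending-&bt flag that defers the arg count until the next token is seen.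
import Mathlib
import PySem

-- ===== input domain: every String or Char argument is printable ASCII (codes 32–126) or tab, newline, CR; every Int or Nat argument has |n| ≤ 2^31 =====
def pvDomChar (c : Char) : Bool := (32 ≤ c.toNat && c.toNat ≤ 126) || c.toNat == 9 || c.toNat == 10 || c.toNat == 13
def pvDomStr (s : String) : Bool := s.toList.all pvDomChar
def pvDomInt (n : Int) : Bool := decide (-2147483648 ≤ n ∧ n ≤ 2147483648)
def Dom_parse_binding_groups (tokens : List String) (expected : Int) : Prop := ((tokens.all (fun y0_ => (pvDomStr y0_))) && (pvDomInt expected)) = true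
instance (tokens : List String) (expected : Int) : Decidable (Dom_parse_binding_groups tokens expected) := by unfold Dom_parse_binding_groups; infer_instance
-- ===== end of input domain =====

-- B is a single forward fold with an open-group countdown instead of A's index-and-slice
-- while loop (objective: alternative decomposition, same cost); return values only are compared.

-- ===== PORT A =====
-- BEHAVIOR_ARG_COUNTS
def pvArgcDict : PySem.Dict String Int :=
  PySem.Dict.ofList [("&kp", 1), ("&hml", 2), ("&hmr", 2), ("&hmr_meh", 2), ("&lt", 2), ("&sk", 1), ("&bt", 2)]

-- BEHAVIOR_ARG_COUNTS.get(token, 0); its values are the literals 1/2, default 0, hence ≥ 0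
def pvArgcGet (t : String) : Int := PySem.Dict.getD pvArgcDict t 0

theorem pvArgcGet_nonneg (t : String) : 0 ≤ pvArgcGet t := by
  have h : pvArgcDict = PySem.Dict.mk
      [("&kp", 1), ("&hml", 2), ("&hmr", 2), ("&hmr_meh", 2), ("&lt", 2), ("&sk", 1), ("&bt", 2)] := by
    decide
  unfold pvArgcGet
  rw [h]
  simp only [PySem.Dict.getD, PySem.Dict.get?_mk_cons]
  repeat' split
  all_goals simp_all [PySem.Dict.get?]

-- the while loop of A: state (i, groups); 'none' = the 'Incomplete &bt binding' raise
def goA (tokens : List String) (i : Nat) (groups : List (List String)) :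
    Option (List (List String)) :=
  if h : i < tokens.length then
    let token := tokens[i]
    if PySem.Str.startswith token "&" then
      if token = "&bt" then
        if h2 : tokens.length ≤ i + 1 then none    -- raise ValueError("Incomplete &bt binding")
        else
          let argc : Int := if tokens[i + 1]'(by omega) = "BT_SEL" then 2 else 1
          goA tokens (i + (1 + argc).toNat)
            (groups ++ [PySem.List.slice tokens (some (i : Int)) (some ((i : Int) + 1 + argc))])
      else
        let argc : Int := pvArgcGet token
        goA tokens (i + (1 + argc).toNat)
          (groups ++ [PySem.List.slice tokens (some (i : Int)) (some ((i : Int) + 1 + argc))])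
    else
      goA tokens (i + 1) (groups ++ [[token]])
  else some groups
termination_by tokens.length - i
decreasing_by
  · split <;> omega
  · have := pvArgcGet_nonneg tokens[i]; omega
  · omega

def parse_binding_groups (tokens : List String) (expected : Int) : List (List String) :=
  match goA tokens 0 [] with
  | none => []          -- Python raises ValueError here (excluded by Pre_)
  | some groups => if (groups.length : Int) = expected then groups else []  -- else: raise

-- ===== PORT B =====
-- loop state: (groups, current, need, pending_bt)
def pvStateB : Type := List (List String) × Option (List String) × Int × Bool

def stepB (st : pvStateB) (token : String) : pvStateB :=
  let (groups, current, need, pending) := st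
  match current with
  | none =>
      let current' := [token]
      if token = "&bt" then (groups, some current', need, true)
      else
        let need' := pvArgcGet token
        if need' = 0 then (groups ++ [current'], none, need', false)
        else (groups, some current', need', false)
  | some cur =>
      let current' := cur ++ [token]
      let (need', pending') :=
        if pending then ((if token = "BT_SEL" then (1 : Int) else 0), false)
        else (need - 1, pending)
      if ¬ pending' ∧ need' = 0 then (groups ++ [current'], none, need', false)
      else (groups, some current', need', pending')

def parse_binding_groups_alt (tokens : List String) (expected : Int) : List (List String) :=
  let st := tokens.foldl stepB ([], none, 0, false)
  match st.2.1 with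
  | some cur =>
      if st.2.2.2 then []       -- pending_bt: raise ValueError("Incomplete &bt binding")
      else
        let groups := st.1 ++ [cur]
        if (groups.length : Int) = expected then groups else []  -- else: raise
  | none => if (st.1.length : Int) = expected then st.1 else []  -- else: raise

-- ===== PRECONDITION & SPEC =====
-- Specification of the binding grouping that Pre_ is stated against (not a copy of either
-- port: A walks an index and slices, B folds with a countdown; this reads each group off
-- the front of the list). Structural on a fuel = tokens.length so the Decidable instance
-- evaluates by kernel reduction; each step consumes at least one token, so the fuel
-- never runs out on the lists it is asked about.
def specGroupsF : Nat → List String → Option (List (List String))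
  | _, [] => some []
  | 0, _ :: _ => none
  | fuel + 1, t :: rest =>
    if t = "&bt" then
      match rest with
      | [] => none
      | u :: rest2 =>
        let a : Nat := if u = "BT_SEL" then 1 else 0
        (specGroupsF fuel (rest2.drop a)).map (fun gs => (t :: u :: rest2.take a) :: gs)
    else
      let a : Nat := (pvArgcGet t).toNat
      (specGroupsF fuel (rest.drop a)).map (fun gs => (t :: rest.take a) :: gs)

-- Pre_ excludes exactly the inputs where Python A raises ValueError:
-- a '&bt' opening a group as the last token, or a number of groups ≠ expected.
def Pre_parse_binding_groups (tokens : List String) (expected : Int) : Prop :=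
  (specGroupsF tokens.length tokens).map (fun gs => (gs.length : Int)) = some expected

instance (tokens : List String) (expected : Int) : Decidable (Pre_parse_binding_groups tokens expected) := by
  unfold Pre_parse_binding_groups; infer_instance

def pvWitness_parse_binding_groups : List String × Int := (["&kp", "A", "&bt", "BT_SEL", "3", "ESC"], 3)

def Spec_parse_binding_groups (tokens : List String) (expected : Int) (out : List (List String)) : Prop := out = parse_binding_groups_alt tokens expected
instance (tokens : List String) (expected : Int) (out : List (List String)) : Decidable (Spec_parse_binding_groups tokens expected out) := by unfold Spec_parse_binding_groups; infer_instance

-- ===== CLAIM (what is proved, stated in full; the proofs are below) =====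
def Claim_equal_parse_binding_groups : Prop := ∀ (tokens : List String) (expected : Int), Dom_parse_binding_groups tokens expected → Pre_parse_binding_groups tokens expected → Spec_parse_binding_groups tokens expected (parse_binding_groups tokens expected)

-- ===== LEMMAS AND PROOFS =====

-- reference grouping used only to state Pre_ (none = a trailing '&bt' makes A raise)
def specGroups : List String → Option (List (List String))
  | [] => some []
  | t :: rest =>
    if t = "&bt" then
      match rest with
      | [] => none
      | u :: rest2 =>
        let a : Nat := if u = "BT_SEL" then 1 else 0
        (specGroups (rest2.drop a)).map (fun gs => (t :: u :: rest2.take a) :: gs)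
    else
      let a : Nat := (pvArgcGet t).toNat
      (specGroups (rest.drop a)).map (fun gs => (t :: rest.take a) :: gs)
termination_by l => l.length
decreasing_by
  all_goals simp only [List.length_drop, List.length_cons]
  all_goals (try split) <;> omega


-- pvArgcGet only knows keys that start with '&'
theorem pvArgcGet_eq_zero (t : String) (h : PySem.Str.startswith t "&" = false) :
    pvArgcGet t = 0 := by
  have hd : pvArgcDict = PySem.Dict.mk
      [("&kp", 1), ("&hml", 2), ("&hmr", 2), ("&hmr_meh", 2), ("&lt", 2), ("&sk", 1), ("&bt", 2)] := by
    decide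
  unfold pvArgcGet
  rw [hd]
  simp only [PySem.Dict.getD, PySem.Dict.get?_mk_cons]
  repeat' split
  all_goals simp_all [PySem.Dict.get?]
  all_goals (subst_vars; revert h; decide)

theorem goA_aux (n : Nat) (tokens : List String) (i : Nat) (hn : tokens.length - i ≤ n)
    (groups : List (List String)) :
    goA tokens i groups = (specGroups (tokens.drop i)).map (groups ++ ·) := by
  induction n generalizing i groups with
  | zero =>
      have hi : tokens.length ≤ i := by omega
      rw [goA, dif_neg (by omega)]
      simp [List.drop_of_length_le hi, specGroups]
  | succ n ih =>
      by_cases hi : i < tokens.length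
      · have hdrop : tokens.drop i = tokens[i] :: tokens.drop (i + 1) :=
          List.drop_eq_getElem_cons hi
        rw [goA, dif_pos hi]
        by_cases hamp : PySem.Str.startswith tokens[i] "&"
        · by_cases hbt : tokens[i] = "&bt"
          · rw [if_pos hamp, if_pos hbt]
            by_cases hend : tokens.length ≤ i + 1
            · rw [dif_pos hend]
              have : tokens.drop (i + 1) = [] := List.drop_of_length_le hend
              rw [hdrop, this, hbt]
              simp [specGroups]
            · rw [dif_neg hend]
              have hi1 : i + 1 < tokens.length := by omega
              have hdrop1 : tokens.drop (i + 1) = tokens[i + 1] :: tokens.drop (i + 2) :=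
                List.drop_eq_getElem_cons hi1
              by_cases hu : tokens[i + 1]'(by omega) = "BT_SEL"
              · simp only [hu, if_pos]
                have hsl : PySem.List.slice tokens (some (i : Int)) (some ((i : Int) + 1 + 2)) =
                    (tokens.drop i).take 3 := by
                  have h3 : ((i : Int) + 1 + 2) = ((i + 3 : Nat) : Int) := by push_cast; ring
                  rw [h3, PySem.List.slice_natCast]
                  congr 1
                  omega
                rw [hsl]
                rw [show (1 + (2 : Int)).toNat = 3 from rfl]
                rw [ih (i + 3) (by omega)]
                rw [hdrop, hdrop1, hbt, hu]
                cases hs : specGroups (tokens.drop (i + 3)) with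
                | none => simp [specGroups, hs, show i + 2 + 1 = i + 3 from by omega]
                | some gs =>
                    simp [specGroups, hs, show i + 2 + 1 = i + 3 from by omega,
                      List.take_succ_cons, List.append_assoc]
              · rw [if_neg hu]
                show goA tokens (i + (1 + (1 : Int)).toNat)
                    (groups ++ [PySem.List.slice tokens (some (i : Int)) (some ((i : Int) + 1 + 1))]) = _
                have hsl : PySem.List.slice tokens (some (i : Int)) (some ((i : Int) + 1 + 1)) =
                    (tokens.drop i).take 2 := by
                  have h2 : ((i : Int) + 1 + 1) = ((i + 2 : Nat) : Int) := by push_cast; ring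
                  rw [h2, PySem.List.slice_natCast]
                  congr 1
                  omega
                rw [hsl]
                rw [show (1 + (1 : Int)).toNat = 2 from rfl]
                rw [ih (i + 2) (by omega)]
                rw [hdrop, hdrop1, hbt]
                cases hs : specGroups (tokens.drop (i + 2)) with
                | none => simp [specGroups, hs, hu, -List.getElem_cons_drop]
                | some gs =>
                    simp [specGroups, hs, hu, -List.getElem_cons_drop,
                      List.take_succ_cons, List.append_assoc]
          · rw [if_pos hamp, if_neg hbt]
            have harg : 0 ≤ pvArgcGet tokens[i] := pvArgcGet_nonneg _
            set a : Int := pvArgcGet tokens[i] with ha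
            show goA tokens (i + (1 + a).toNat)
                (groups ++ [PySem.List.slice tokens (some (i : Int)) (some ((i : Int) + 1 + a))]) = _
            have hk : ((1 + a).toNat) = 1 + a.toNat := by omega
            have hsl : PySem.List.slice tokens (some (i : Int)) (some ((i : Int) + 1 + a)) =
                (tokens.drop i).take (1 + a.toNat) := by
              have h2 : ((i : Int) + 1 + a) = ((i + (1 + a.toNat) : Nat) : Int) := by
                push_cast [Int.toNat_of_nonneg harg]; ring
              rw [h2, PySem.List.slice_natCast]
              congr 1
              omega
            rw [hsl, hk]
            rw [ih (i + (1 + a.toNat)) (by omega)]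
            rw [hdrop]
            cases hs : specGroups (tokens.drop (i + (1 + a.toNat))) with
            | none =>
                rw [specGroups.eq_def]
                simp [hs, hbt, ← ha, -List.getElem_cons_drop,
                  show i + 1 + a.toNat = i + (1 + a.toNat) from by omega]
            | some gs =>
                rw [specGroups.eq_def]
                simp [hs, hbt, ← ha, -List.getElem_cons_drop,
                  show i + 1 + a.toNat = i + (1 + a.toNat) from by omega,
                  List.append_assoc]
                rw [show (1 + a.toNat) = a.toNat + 1 from by omega, List.take_succ_cons]
        · rw [if_neg hamp]
          have h0 : pvArgcGet tokens[i] = 0 := pvArgcGet_eq_zero _ (by simpa using hamp)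
          have hbt : tokens[i] ≠ "&bt" := by
            intro h; rw [h] at hamp; exact hamp (by decide)
          rw [ih (i + 1) (by omega)]
          rw [hdrop]
          cases hs : specGroups (tokens.drop (i + 1)) with
          | none =>
              rw [specGroups.eq_def]
              simp [hs, hbt, h0, -List.getElem_cons_drop]
          | some gs =>
              rw [specGroups.eq_def]
              simp [hs, hbt, h0, -List.getElem_cons_drop, List.append_assoc]
      · have hd : tokens.drop i = [] := List.drop_of_length_le (by omega)
        rw [goA, dif_neg hi, hd]
        simp [specGroups]

theorem goA_eq_spec (tokens : List String) (i : Nat) (groups : List (List String)) :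
    goA tokens i groups = (specGroups (tokens.drop i)).map (groups ++ ·) :=
  goA_aux (tokens.length - i) tokens i le_rfl groups

-- resultB: what B's post-loop current/pending handling yields from a final state
def resultB (st : pvStateB) : Option (List (List String)) :=
  match st.2.1 with
  | some cur => if st.2.2.2 then none else some (st.1 ++ [cur])
  | none => some st.1

-- folding an open (non-pending) group owed k args over at most k tokens
theorem foldB_open (k : Nat) (hk : 1 ≤ k) (xs : List String) (hx : xs.length ≤ k)
    (cur : List String) (groups : List (List String)) :
    xs.foldl stepB (groups, some cur, (k : Int), false) =
      if xs.length = k then (groups ++ [cur ++ xs], none, 0, false)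
      else (groups, some (cur ++ xs), ((k : Int) - xs.length), false) := by
  induction xs generalizing k cur groups with
  | nil =>
      rw [List.foldl_nil, List.length_nil, if_neg (by omega)]
      simp
  | cons t ts ih =>
      rw [List.foldl_cons]
      have hstep : stepB (groups, some cur, (k : Int), false) t =
          if ((k : Int) - 1) = 0 then (groups ++ [cur ++ [t]], none, (k : Int) - 1, false)
          else (groups, some (cur ++ [t]), (k : Int) - 1, false) := by
        show (if ¬ false = true ∧ (k : Int) - 1 = 0 then
            (groups ++ [cur ++ [t]], none, (k : Int) - 1, false)
          else (groups, some (cur ++ [t]), (k : Int) - 1, false)) = _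
        simp
      rw [hstep]
      by_cases hk1 : k = 1
      · subst hk1
        have hts : ts = [] := by
          rw [List.length_cons] at hx
          exact List.eq_nil_of_length_eq_zero (by omega)
        subst hts
        rw [if_pos (by norm_num)]
        simp
      · rw [if_neg (by omega)]
        have hc : ((k : Int) - 1) = ((k - 1 : Nat) : Int) := by omega
        rw [hc, ih (k - 1) (by omega) (by simp only [List.length_cons] at hx; omega) (cur ++ [t]) groups]
        rw [List.length_cons]
        by_cases hlen : ts.length = k - 1
        · rw [if_pos hlen, if_pos (by omega)]
          simp
        · rw [if_neg hlen, if_neg (by omega)]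
          simp only [List.length_cons] at hx
          simp [List.append_assoc]
          have hq : ((k - 1 : Nat) : Int) - (ts.length : Int) = (k : Int) - ((ts.length : Int) + 1) := by
            omega
          rw [hq]

theorem foldB_aux (n : Nat) (l : List String) (hl : l.length ≤ n)
    (groups : List (List String)) (need : Int) :
    resultB (l.foldl stepB (groups, none, need, false)) =
      (specGroups l).map (groups ++ ·) := by
  induction n generalizing l groups need with
  | zero =>
      have : l = [] := List.eq_nil_of_length_eq_zero (by omega)
      subst this
      simp [resultB, specGroups]
  | succ n ih =>
      cases l with
      | nil => simp [resultB, specGroups]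
      | cons t rest =>
          rw [List.foldl_cons]
          by_cases hbt : t = "&bt"
          · subst hbt
            rw [show stepB (groups, none, need, false) "&bt" = (groups, some ["&bt"], need, true)
              from by simp [stepB]]
            cases rest with
            | nil =>
                simp [resultB, specGroups]
            | cons u rest2 =>
                rw [List.foldl_cons]
                by_cases hu : u = "BT_SEL"
                · subst hu
                  rw [show stepB (groups, some ["&bt"], need, true) "BT_SEL" =
                      (groups, some ["&bt", "BT_SEL"], (1 : Int), false) from by simp [stepB]]
                  cases rest2 with
                  | nil =>
                      simp [resultB, specGroups]
                  | cons v rest3 =>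
                      rw [List.foldl_cons]
                      rw [show stepB (groups, some ["&bt", "BT_SEL"], (1 : Int), false) v =
                          (groups ++ [["&bt", "BT_SEL", v]], none, 0, false) from by simp [stepB]]
                      rw [ih rest3 (by simp at hl; omega)]
                      cases hs : specGroups rest3 with
                      | none => rw [specGroups.eq_def]; simp [hs]
                      | some gs => rw [specGroups.eq_def]; simp [hs, List.append_assoc]
                · rw [show stepB (groups, some ["&bt"], need, true) u =
                      (groups ++ [["&bt", u]], none, 0, false) from by simp [stepB, hu]]
                  rw [ih rest2 (by simp at hl; omega)]
                  cases hs : specGroups rest2 with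
                  | none => rw [specGroups.eq_def]; simp [hs, hu]
                  | some gs => rw [specGroups.eq_def]; simp [hs, hu, List.append_assoc]
          · have harg : 0 ≤ pvArgcGet t := pvArgcGet_nonneg t
            by_cases h0 : pvArgcGet t = 0
            · rw [show stepB (groups, none, need, false) t = (groups ++ [[t]], none, 0, false)
                from by simp [stepB, hbt, h0]]
              rw [ih rest (by simp at hl; omega)]
              cases hs : specGroups rest with
              | none => rw [specGroups.eq_def]; simp [hs, hbt, h0]
              | some gs => rw [specGroups.eq_def]; simp [hs, hbt, h0, List.append_assoc]
            · set k : Nat := (pvArgcGet t).toNat with hkdef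
              have hk1 : 1 ≤ k := by omega
              have hkc : ((k : Nat) : Int) = pvArgcGet t := Int.toNat_of_nonneg harg
              rw [show stepB (groups, none, need, false) t =
                  (groups, some [t], pvArgcGet t, false) from by
                simp [stepB, hbt, h0]]
              rw [← hkc]
              conv_lhs => rw [← List.take_append_drop k rest]
              rw [List.foldl_append]
              rw [foldB_open k hk1 (rest.take k) (by simp) [t] groups]
              by_cases hlen : (rest.take k).length = k
              · rw [if_pos hlen]
                rw [ih (rest.drop k) (by simp at hl ⊢; omega)]
                cases hs : specGroups (rest.drop k) with
                | none => rw [specGroups.eq_def]; simp [hs, hbt, ← hkdef]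
                | some gs => rw [specGroups.eq_def]; simp [hs, hbt, ← hkdef, List.append_assoc]
              · rw [if_neg hlen]
                have hshort : rest.length < k := by
                  simp [List.length_take] at hlen
                  omega
                have htk : rest.take k = rest := List.take_of_length_le (by omega)
                have hdk : rest.drop k = [] := List.drop_of_length_le (by omega)
                rw [htk, hdk, List.foldl_nil]
                rw [specGroups.eq_def]
                simp [resultB, hbt, ← hkdef, htk, hdk, specGroups]

theorem foldB_eq_spec (l : List String) (groups : List (List String)) (need : Int) :
    resultB (l.foldl stepB (groups, none, need, false)) =
      (specGroups l).map (groups ++ ·) :=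
  foldB_aux l.length l le_rfl groups need

-- ===== VERDICT (by name: the statement is the Claim_ definition above) =====
theorem parse_binding_groups_spec : Claim_equal_parse_binding_groups := by
  intro tokens expected _ _
  unfold Spec_parse_binding_groups parse_binding_groups parse_binding_groups_alt
  have hA := goA_eq_spec tokens 0 []
  have hB := foldB_eq_spec tokens [] 0
  simp only [List.drop_zero] at hA
  rw [hA]
  rw [show (tokens.foldl stepB ([], none, 0, false) : pvStateB) =
        tokens.foldl stepB (([] : List (List String)), none, (0 : Int), false) from rfl] at *
  cases hS : specGroups tokens with
  | none =>
      rw [hS] at hB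
      simp only [Option.map_none]
      unfold resultB at hB
      cases hc : (tokens.foldl stepB ([], none, 0, false) : pvStateB).2.1 with
      | none => simp [hc] at hB
      | some cur => simp [hc] at hB; simp [hB]
  | some gs =>
      rw [hS] at hB
      simp only [Option.map_some]
      unfold resultB at hB
      cases hc : (tokens.foldl stepB ([], none, 0, false) : pvStateB).2.1 with
      | none => simp [hc] at hB; simp [hB]
      | some cur =>
          simp [hc] at hB
          obtain ⟨hp, hval⟩ := hB
          simp [hp, hval]
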